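-- pv_equiv track=rewrite | github.com/Gelani-health/version11 | mini-services/medical-rag-service/app/diagnostic/bayesian_reasoning.py | match_complaint_to_cluster
-- ===== SOURCE A (Python) =====
-- def match_complaint_to_cluster(chief_complaint: str) -> str:
--     """
--     Match a chief complaint string to the most appropriate cluster.
--
--     Uses keyword matching to score each cluster and returns the highest-scoring one.
--     Falls back to 'fever_and_cough' as the safest default.
--     NEVER returns R69 or any ICD code as fallback.
--
--     Args:
--         chief_complaint: The patient's chief complaint string
--
--     Returns:
--         The cluster name string (e.g., 'chest_pain', 'headache')
--     """
--     if not chief_complaint: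
--         return "fever_and_cough"  # Safest default
--
--     # Lowercase and tokenize
--     complaint_lower = chief_complaint.lower()
--     tokens = set(complaint_lower.split())
--
--     # Add multi-word phrases
--     for phrase in ["chest pain", "shortness of breath", "left arm", "passed out",
--                    "worst headache", "worst of my life", "never had before",
--                    "sudden onset", "loss of consciousness", "fast heart",
--                    "racing heart", "irregular heartbeat", "skipping beats"]:
--         if phrase in complaint_lower:
--             tokens.add(phrase)
--
--     # Cluster keyword definitions
--     # Note: Order matters for tie-breaking when scores are equal
--     cluster_keywords = {
--         "chest_pain": {
--             "chest", "pectoral", "sternal", "precordial", "cardiac",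
--             "left arm", "jaw", "substernal"
--         },
--         "fever_and_cough": {
--             "fever", "cough", "sputum", "productive", "temperature", "chills",
--             "rigors", "respiratory", "flu", "influenza", "cold"
--         },
--         "headache": {
--             "headache", "head pain", "migraine", "cephalgia", "scalp",
--             "worst headache", "thunderclap"
--         },
--         "abdominal_pain": {
--             "abdomen", "abdominal", "stomach", "belly", "nausea", "vomiting",
--             "epigastric", "periumbilical", "flank", "groin", "rlq", "ruq",
--             "llq", "luq"
--         },
--         "dyspnea": {
--             "breath", "breathing", "dyspnea", "shortness", "sob", "wheeze",
--             "wheezing", "shortness of breath", "air hunger", "suffocating"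
--         },
--         "altered_mental_status": {
--             "confused", "confusion", "altered", "disoriented", "unresponsive",
--             "drowsy", "lethargic", "ams", "agitated", "delirium", "encephalopathy"
--         },
--         "palpitations": {
--             "palpitations", "racing heart", "fast heart", "irregular heartbeat",
--             "skipping", "flutter", "heart racing", "heartbeat", "skipped beat",
--             "heart", "cardiac arrhythmia"
--         },
--         "syncope_or_presyncope": {
--             "faint", "fainting", "syncope", "passed out", "blackout", "presyncope",
--             "dizzy", "lightheaded", "loss of consciousness", "near faint"
--         }
--     }
--
--     # Score each cluster
--     scores = {}
--     for cluster, keywords in cluster_keywords.items():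
--         score = len(tokens.intersection(keywords))
--         scores[cluster] = score
--
--     # Find highest scoring cluster
--     max_score = max(scores.values())
--
--     if max_score == 0:
--         return "fever_and_cough"  # Safest default when no keywords match
--
--     # Return cluster with highest score
--     for cluster, score in scores.items():
--         if score == max_score:
--             return cluster
--
--     return "fever_and_cough"
-- ===== SOURCE B (Python) =====
-- # Flat keyword table + one filtering pass + a running-argmax loop (no dicts, no max()).
--
-- PHRASES = [
--     "chest pain", "shortness of breath", "left arm", "passed out",
--     "worst headache", "worst of my life", "never had before",
--     "sudden onset", "loss of consciousness", "fast heart",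
--     "racing heart", "irregular heartbeat", "skipping beats",
-- ]
--
-- CLUSTERS = [
--     "chest_pain", "fever_and_cough", "headache", "abdominal_pain",
--     "dyspnea", "altered_mental_status", "palpitations", "syncope_or_presyncope",
-- ]
--
-- KEYWORD_CLUSTER = [
--     ("chest", "chest_pain"), ("pectoral", "chest_pain"), ("sternal", "chest_pain"),
--     ("precordial", "chest_pain"), ("cardiac", "chest_pain"), ("left arm", "chest_pain"),
--     ("jaw", "chest_pain"), ("substernal", "chest_pain"),
--     ("fever", "fever_and_cough"), ("cough", "fever_and_cough"), ("sputum", "fever_and_cough"),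
--     ("productive", "fever_and_cough"), ("temperature", "fever_and_cough"),
--     ("chills", "fever_and_cough"), ("rigors", "fever_and_cough"),
--     ("respiratory", "fever_and_cough"), ("flu", "fever_and_cough"),
--     ("influenza", "fever_and_cough"), ("cold", "fever_and_cough"),
--     ("headache", "headache"), ("head pain", "headache"), ("migraine", "headache"),
--     ("cephalgia", "headache"), ("scalp", "headache"), ("worst headache", "headache"),
--     ("thunderclap", "headache"),
--     ("abdomen", "abdominal_pain"), ("abdominal", "abdominal_pain"),
--     ("stomach", "abdominal_pain"), ("belly", "abdominal_pain"),
--     ("nausea", "abdominal_pain"), ("vomiting", "abdominal_pain"),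
--     ("epigastric", "abdominal_pain"), ("periumbilical", "abdominal_pain"),
--     ("flank", "abdominal_pain"), ("groin", "abdominal_pain"),
--     ("rlq", "abdominal_pain"), ("ruq", "abdominal_pain"),
--     ("llq", "abdominal_pain"), ("luq", "abdominal_pain"),
--     ("breath", "dyspnea"), ("breathing", "dyspnea"), ("dyspnea", "dyspnea"),
--     ("shortness", "dyspnea"), ("sob", "dyspnea"), ("wheeze", "dyspnea"),
--     ("wheezing", "dyspnea"), ("shortness of breath", "dyspnea"),
--     ("air hunger", "dyspnea"), ("suffocating", "dyspnea"),
--     ("confused", "altered_mental_status"), ("confusion", "altered_mental_status"),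
--     ("altered", "altered_mental_status"), ("disoriented", "altered_mental_status"),
--     ("unresponsive", "altered_mental_status"), ("drowsy", "altered_mental_status"),
--     ("lethargic", "altered_mental_status"), ("ams", "altered_mental_status"),
--     ("agitated", "altered_mental_status"), ("delirium", "altered_mental_status"),
--     ("encephalopathy", "altered_mental_status"),
--     ("palpitations", "palpitations"), ("racing heart", "palpitations"),
--     ("fast heart", "palpitations"), ("irregular heartbeat", "palpitations"),
--     ("skipping", "palpitations"), ("flutter", "palpitations"),
--     ("heart racing", "palpitations"), ("heartbeat", "palpitations"),
--     ("skipped beat", "palpitations"), ("heart", "palpitations"),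
--     ("cardiac arrhythmia", "palpitations"),
--     ("faint", "syncope_or_presyncope"), ("fainting", "syncope_or_presyncope"),
--     ("syncope", "syncope_or_presyncope"), ("passed out", "syncope_or_presyncope"),
--     ("blackout", "syncope_or_presyncope"), ("presyncope", "syncope_or_presyncope"),
--     ("dizzy", "syncope_or_presyncope"), ("lightheaded", "syncope_or_presyncope"),
--     ("loss of consciousness", "syncope_or_presyncope"),
--     ("near faint", "syncope_or_presyncope"),
-- ]
--
--
-- def match_complaint_to_cluster(chief_complaint: str) -> str:
--     text = chief_complaint.lower()
--     tokens = set(text.split())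
--     for phrase in PHRASES:
--         if phrase in text:
--             tokens.add(phrase)
--
--     # clusters of every matched keyword, one filtering pass over the flat table
--     hits = [cluster for keyword, cluster in KEYWORD_CLUSTER if keyword in tokens]
--
--     # running argmax with strict '>': first cluster (in order) attaining the max wins,
--     # and the 'fever_and_cough' seed with score 0 is the zero/empty fallback
--     best_cluster, best_score = "fever_and_cough", 0
--     for cluster in CLUSTERS:
--         n = hits.count(cluster)
--         if n > best_score:
--             best_cluster, best_score = cluster, n
--     return best_cluster
-- ===== Notes on version B (the rewrite author's own statement) =====
-- stated objective: alternative
-- what changed: Replaces A's per-cluster keyword-set intersections, scores dict, max() and final rescan by a flat (keyword, cluster) table filtered in one pass into a list of hit clusters and a single running strict greater-than argmax loop over the ordered cluster names (seeded with the 'fever_and_cough'/0 fallback, so zero-score and tie-breaking behaviour are unchanged).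
import Mathlib
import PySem

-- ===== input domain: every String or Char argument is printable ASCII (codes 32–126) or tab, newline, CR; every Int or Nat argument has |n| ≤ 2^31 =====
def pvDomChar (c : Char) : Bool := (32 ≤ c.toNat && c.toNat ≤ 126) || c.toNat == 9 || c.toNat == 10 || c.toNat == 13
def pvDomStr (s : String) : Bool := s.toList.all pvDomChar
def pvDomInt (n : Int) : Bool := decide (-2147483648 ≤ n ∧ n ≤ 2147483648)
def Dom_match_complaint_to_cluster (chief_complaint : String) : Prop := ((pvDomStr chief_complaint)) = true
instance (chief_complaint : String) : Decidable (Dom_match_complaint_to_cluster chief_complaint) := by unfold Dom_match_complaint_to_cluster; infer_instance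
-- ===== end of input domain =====

-- B replaces A's per-cluster set intersections + scores dict + max() + rescan by a flat
-- (keyword, cluster) table filtered in one pass and a running strict greater-than argmax loop (alternative).

-- shared module constant: the multi-word phrase list (identical literal in both sources)
def pvPhrases : List String := ["chest pain", "shortness of breath", "left arm", "passed out", "worst headache", "worst of my life", "never had before", "sudden onset", "loss of consciousness", "fast heart", "racing heart", "irregular heartbeat", "skipping beats"]

-- ===== PORT A =====
-- A's cluster_keywords: cluster → set of keywords (only set sizes are used, so set order is irrelevant)
def pvClusterKeywordsA : List (String × PySem.Set String) := [
  ("chest_pain", PySem.Set.ofList ["chest", "pectoral", "sternal", "precordial", "cardiac", "left arm", "jaw", "substernal"]),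
  ("fever_and_cough", PySem.Set.ofList ["fever", "cough", "sputum", "productive", "temperature", "chills", "rigors", "respiratory", "flu", "influenza", "cold"]),
  ("headache", PySem.Set.ofList ["headache", "head pain", "migraine", "cephalgia", "scalp", "worst headache", "thunderclap"]),
  ("abdominal_pain", PySem.Set.ofList ["abdomen", "abdominal", "stomach", "belly", "nausea", "vomiting", "epigastric", "periumbilical", "flank", "groin", "rlq", "ruq", "llq", "luq"]),
  ("dyspnea", PySem.Set.ofList ["breath", "breathing", "dyspnea", "shortness", "sob", "wheeze", "wheezing", "shortness of breath", "air hunger", "suffocating"]),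
  ("altered_mental_status", PySem.Set.ofList ["confused", "confusion", "altered", "disoriented", "unresponsive", "drowsy", "lethargic", "ams", "agitated", "delirium", "encephalopathy"]),
  ("palpitations", PySem.Set.ofList ["palpitations", "racing heart", "fast heart", "irregular heartbeat", "skipping", "flutter", "heart racing", "heartbeat", "skipped beat", "heart", "cardiac arrhythmia"]),
  ("syncope_or_presyncope", PySem.Set.ofList ["faint", "fainting", "syncope", "passed out", "blackout", "presyncope", "dizzy", "lightheaded", "loss of consciousness", "near faint"])]

-- A's final loop: first cluster (insertion order) whose score equals max_score
def pvFirstA (m : Int) : List (String × Int) → String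
  | [] => "fever_and_cough"
  | (c, s) :: rest => if s = m then c else pvFirstA m rest

def match_complaint_to_cluster (chief_complaint : String) : String :=
  if chief_complaint = "" then "fever_and_cough"
  else
    let complaintLower := PySem.Str.lower chief_complaint
    let tokens0 : PySem.Set String := PySem.Set.ofList (PySem.Str.split₀ complaintLower)
    let tokens : PySem.Set String :=
      pvPhrases.foldl (fun t p => if PySem.Str.isIn p complaintLower then PySem.Set.add t p else t) tokens0
    let scores : PySem.Dict String Int :=
      pvClusterKeywordsA.foldl
        (fun d ck => d.insert ck.1 (PySem.Set.len (PySem.Set.inter tokens ck.2))) PySem.Dict.empty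
    let maxScore : Int := (PySem.List.max? scores.values (fun x => x)).getD 0
    if maxScore = 0 then "fever_and_cough"
    else pvFirstA maxScore scores.items

-- ===== PORT B =====
-- B's CLUSTERS: the cluster names, in tie-breaking order
def pvClusters : List String := ["chest_pain", "fever_and_cough", "headache", "abdominal_pain", "dyspnea", "altered_mental_status", "palpitations", "syncope_or_presyncope"]

-- B's KEYWORD_CLUSTER: one flat (keyword, owning cluster) table
def pvKeywordCluster : List (String × String) := [
  ("chest", "chest_pain"), ("pectoral", "chest_pain"), ("sternal", "chest_pain"),
  ("precordial", "chest_pain"), ("cardiac", "chest_pain"), ("left arm", "chest_pain"),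
  ("jaw", "chest_pain"), ("substernal", "chest_pain"),
  ("fever", "fever_and_cough"), ("cough", "fever_and_cough"), ("sputum", "fever_and_cough"),
  ("productive", "fever_and_cough"), ("temperature", "fever_and_cough"),
  ("chills", "fever_and_cough"), ("rigors", "fever_and_cough"),
  ("respiratory", "fever_and_cough"), ("flu", "fever_and_cough"),
  ("influenza", "fever_and_cough"), ("cold", "fever_and_cough"),
  ("headache", "headache"), ("head pain", "headache"), ("migraine", "headache"),
  ("cephalgia", "headache"), ("scalp", "headache"), ("worst headache", "headache"),
  ("thunderclap", "headache"),
  ("abdomen", "abdominal_pain"), ("abdominal", "abdominal_pain"),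
  ("stomach", "abdominal_pain"), ("belly", "abdominal_pain"),
  ("nausea", "abdominal_pain"), ("vomiting", "abdominal_pain"),
  ("epigastric", "abdominal_pain"), ("periumbilical", "abdominal_pain"),
  ("flank", "abdominal_pain"), ("groin", "abdominal_pain"),
  ("rlq", "abdominal_pain"), ("ruq", "abdominal_pain"),
  ("llq", "abdominal_pain"), ("luq", "abdominal_pain"),
  ("breath", "dyspnea"), ("breathing", "dyspnea"), ("dyspnea", "dyspnea"),
  ("shortness", "dyspnea"), ("sob", "dyspnea"), ("wheeze", "dyspnea"),
  ("wheezing", "dyspnea"), ("shortness of breath", "dyspnea"),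
  ("air hunger", "dyspnea"), ("suffocating", "dyspnea"),
  ("confused", "altered_mental_status"), ("confusion", "altered_mental_status"),
  ("altered", "altered_mental_status"), ("disoriented", "altered_mental_status"),
  ("unresponsive", "altered_mental_status"), ("drowsy", "altered_mental_status"),
  ("lethargic", "altered_mental_status"), ("ams", "altered_mental_status"),
  ("agitated", "altered_mental_status"), ("delirium", "altered_mental_status"),
  ("encephalopathy", "altered_mental_status"),
  ("palpitations", "palpitations"), ("racing heart", "palpitations"),
  ("fast heart", "palpitations"), ("irregular heartbeat", "palpitations"),
  ("skipping", "palpitations"), ("flutter", "palpitations"),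
  ("heart racing", "palpitations"), ("heartbeat", "palpitations"),
  ("skipped beat", "palpitations"), ("heart", "palpitations"),
  ("cardiac arrhythmia", "palpitations"),
  ("faint", "syncope_or_presyncope"), ("fainting", "syncope_or_presyncope"),
  ("syncope", "syncope_or_presyncope"), ("passed out", "syncope_or_presyncope"),
  ("blackout", "syncope_or_presyncope"), ("presyncope", "syncope_or_presyncope"),
  ("dizzy", "syncope_or_presyncope"), ("lightheaded", "syncope_or_presyncope"),
  ("loss of consciousness", "syncope_or_presyncope"),
  ("near faint", "syncope_or_presyncope")]

-- B's comprehension: clusters of every matched keyword, one filtering pass over the flat table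
def pvHits (tokens : PySem.Set String) : List String :=
  pvKeywordCluster.filterMap (fun p => if PySem.Set.contains tokens p.1 then some p.2 else none)

-- B's running-argmax loop over CLUSTERS, seeded with ("fever_and_cough", 0)
def pvBest (hits : List String) : String × Int :=
  pvClusters.foldl
    (fun best c =>
      let n : Int := (PySem.List.count hits c : Int)
      if n > best.2 then (c, n) else best)
    ("fever_and_cough", 0)

def match_complaint_to_cluster_alt (chief_complaint : String) : String :=
  let text := PySem.Str.lower chief_complaint
  let tokens : PySem.Set String :=
    pvPhrases.foldl (fun t p => if PySem.Str.isIn p text then PySem.Set.add t p else t)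
      (PySem.Set.ofList (PySem.Str.split₀ text))
  (pvBest (pvHits tokens)).1

-- ===== PRECONDITION & SPEC =====
def Spec_match_complaint_to_cluster (chief_complaint : String) (out : String) : Prop := out = match_complaint_to_cluster_alt chief_complaint
instance (chief_complaint : String) (out : String) : Decidable (Spec_match_complaint_to_cluster chief_complaint out) := by unfold Spec_match_complaint_to_cluster; infer_instance

-- ===== CLAIM (what is proved, stated in full; the proofs are below) =====
def Claim_equal_match_complaint_to_cluster : Prop := ∀ (chief_complaint : String), Dom_match_complaint_to_cluster chief_complaint → Spec_match_complaint_to_cluster chief_complaint (match_complaint_to_cluster chief_complaint)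

-- ===== LEMMAS AND PROOFS =====

-- proof-side names: A's scores dict, its items list, B's argmax step
abbrev pvScoresA (tk : PySem.Set String) : PySem.Dict String Int :=
  pvClusterKeywordsA.foldl
    (fun d ck => d.insert ck.1 (PySem.Set.len (PySem.Set.inter tk ck.2))) PySem.Dict.empty

abbrev pvItemsA (tk : PySem.Set String) : List (String × Int) :=
  pvClusterKeywordsA.map (fun ck => (ck.1, PySem.Set.len (PySem.Set.inter tk ck.2)))

abbrev pvStep (best p : String × Int) : String × Int := if p.2 > best.2 then p else best

-- the token set stays duplicate-free through the phrase loop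
lemma tokens_nodup (cond : String → Bool) :
    ∀ (l : List String) (s : PySem.Set String), s.Nodup →
      (l.foldl (fun t p => if cond p then PySem.Set.add t p else t) s).Nodup := by
  intro l
  induction l with
  | nil => exact fun s hs => hs
  | cons p l ih =>
    intro s hs
    simp only [List.foldl_cons]
    by_cases h : cond p = true
    · rw [if_pos h]; exact ih _ (PySem.Set.nodup_add s p hs)
    · rw [if_neg h]; exact ih _ hs

-- counting a cluster in the filtered comprehension = counting matching pairs in the flat table
lemma count_filterMap (tk : PySem.Set String) (c : String) :
    ∀ (l : List (String × String)),
      (l.filterMap (fun p => if PySem.Set.contains tk p.1 then some p.2 else none)).count c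
        = l.countP (fun p => PySem.Set.contains tk p.1 && p.2 == c) := by
  intro l
  induction l with
  | nil => rfl
  | cons p l ih =>
    by_cases h : p.1 ∈ tk <;>
      simp [h, List.count_cons, List.countP_cons] <;>
      simpa using ih

-- |{x ∈ L : q x ∧ x ∈ m}| = |{x ∈ m : q x}| for duplicate-free L ⊇ m
lemma countP_and_mem (q : String → Bool) (L m : List String) (hL : L.Nodup) (hm : m.Nodup)
    (hsub : ∀ x ∈ m, x ∈ L) :
    L.countP (fun x => q x && m.contains x) = m.countP q := by
  rw [List.countP_eq_length_filter, List.countP_eq_length_filter]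
  refine List.Perm.length_eq ?_
  rw [List.perm_ext_iff_of_nodup (hL.filter _) (hm.filter _)]
  intro a
  simp only [List.mem_filter, Bool.and_eq_true, List.contains_eq_mem, decide_eq_true_eq]
  constructor
  · rintro ⟨_, hq, hma⟩; exact ⟨hma, hq⟩
  · rintro ⟨hma, hq⟩; exact ⟨hsub a hma, hq, hma⟩

-- |l ∩ m| counted from either side, for duplicate-free l and m
lemma countP_mem_comm (l m : List String) (hl : l.Nodup) (hm : m.Nodup) :
    l.countP (fun x => m.contains x) = m.countP (fun x => l.contains x) := by
  rw [List.countP_eq_length_filter, List.countP_eq_length_filter]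
  refine List.Perm.length_eq ?_
  rw [List.perm_ext_iff_of_nodup (hl.filter _) (hm.filter _)]
  intro a
  simp only [List.mem_filter, List.contains_eq_mem, decide_eq_true_eq]
  exact ⟨fun ⟨h1, h2⟩ => ⟨h2, h1⟩, fun ⟨h1, h2⟩ => ⟨h2, h1⟩⟩

-- per-cluster bridge: B's hit count for a cluster = size of A's set intersection,
-- from three decidable, token-free facts about the two tables
lemma cluster_count (tk : PySem.Set String) (htk : tk.Nodup) (c : String) (kws : List String)
    (hnd : kws.Nodup)
    (hsub : ∀ x ∈ kws, x ∈ pvKeywordCluster.map Prod.fst)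
    (hiff : ∀ p ∈ pvKeywordCluster, (p.2 == c) = kws.contains p.1)
    (hkeys : (pvKeywordCluster.map Prod.fst).Nodup) :
    ((pvHits tk).count c : Int) = PySem.Set.len (PySem.Set.inter tk (PySem.Set.ofList kws)) := by
  have h1 : (pvHits tk).count c
      = pvKeywordCluster.countP (fun p => PySem.Set.contains tk p.1 && kws.contains p.1) := by
    rw [pvHits, count_filterMap]
    exact List.countP_congr (fun p hp => by rw [hiff p hp])
  have h2 : pvKeywordCluster.countP (fun p => PySem.Set.contains tk p.1 && kws.contains p.1)
      = (pvKeywordCluster.map Prod.fst).countP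
          (fun k => PySem.Set.contains tk k && kws.contains k) := by
    rw [List.countP_map]; rfl
  have h3 : (pvKeywordCluster.map Prod.fst).countP
        (fun k => PySem.Set.contains tk k && kws.contains k)
      = kws.countP (fun k => PySem.Set.contains tk k) :=
    countP_and_mem _ _ _ hkeys hnd hsub
  have h4 : PySem.Set.len (PySem.Set.inter tk (PySem.Set.ofList kws))
      = (tk.countP (fun x => PySem.Set.contains (PySem.Set.ofList kws) x) : Int) := by
    simp [PySem.Set.len, PySem.Set.inter, ← List.countP_eq_length_filter]
  rw [h1, h2, h3, h4, PySem.Set.ofList_eq_self_of_nodup kws hnd]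
  have h5 : tk.countP (fun x => PySem.Set.contains kws x)
      = kws.countP (fun x => PySem.Set.contains tk x) := by
    simpa [PySem.Set.contains] using countP_mem_comm tk kws htk hnd
  rw [h5]

-- B's score list over CLUSTERS coincides with A's items list
set_option maxRecDepth 16384 in
lemma lists_eq (tk : PySem.Set String) (htk : tk.Nodup) :
    pvClusters.map (fun c => (c, ((pvHits tk).count c : Int))) = pvItemsA tk := by
  have hkeys : (pvKeywordCluster.map Prod.fst).Nodup := by decide
  simp only [pvClusters, pvItemsA, pvClusterKeywordsA, List.map]
  refine congrArg₂ _ (congrArg _ ?_) (congrArg₂ _ (congrArg _ ?_) (congrArg₂ _ (congrArg _ ?_)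
    (congrArg₂ _ (congrArg _ ?_) (congrArg₂ _ (congrArg _ ?_) (congrArg₂ _ (congrArg _ ?_)
    (congrArg₂ _ (congrArg _ ?_) (congrArg₂ _ (congrArg _ ?_) rfl))))))) <;>
    exact cluster_count tk htk _ _ (by decide) (by decide) (by decide) hkeys

-- the running strict greater-than argmax is 'first index attaining the running maximum'
lemma fold_argmax : ∀ (l : List (String × Int)) (acc : String × Int),
    l.foldl pvStep acc =
      if acc.2 < (l.map Prod.snd).foldl max acc.2
      then (pvFirstA ((l.map Prod.snd).foldl max acc.2) l, (l.map Prod.snd).foldl max acc.2)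
      else acc := by
  intro l
  induction l with
  | nil => intro acc; simp
  | cons p l ih =>
    intro acc
    obtain ⟨pc, ps⟩ := p
    simp only [List.foldl_cons, List.map_cons]
    by_cases hgt : acc.2 < ps
    · have hstep : pvStep acc (pc, ps) = (pc, ps) := by simp [pvStep, hgt]
      rw [hstep, ih (pc, ps), max_eq_right (le_of_lt hgt)]
      have hle := (PySem.List.le_foldl_max (l.map Prod.snd) ps).1
      by_cases h2 : ps < (l.map Prod.snd).foldl max ps
      · rw [if_pos h2, if_pos (lt_trans hgt h2)]
        have hne : ¬ ps = (l.map Prod.snd).foldl max ps := by omega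
        simp [pvFirstA, hne]
      · have hM : (l.map Prod.snd).foldl max ps = ps := by omega
        rw [if_neg h2, hM, if_pos hgt]
        simp [pvFirstA]
    · have hstep : pvStep acc (pc, ps) = acc := by
        simp only [pvStep]; rw [if_neg (by omega)]
      rw [hstep, ih acc]
      have hmax : max acc.2 ps = acc.2 := max_eq_left (by omega)
      rw [hmax]
      by_cases h2 : acc.2 < (l.map Prod.snd).foldl max acc.2
      · rw [if_pos h2, if_pos h2]
        have hle := (PySem.List.le_foldl_max (l.map Prod.snd) acc.2).1
        have hne : ¬ ps = (l.map Prod.snd).foldl max acc.2 := by omega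
        simp [pvFirstA, hne]
      · rw [if_neg h2, if_neg h2]

-- A's items/values are the mapped lists (definitional)
lemma itemsA_eq (tk : PySem.Set String) : (pvScoresA tk).items = pvItemsA tk := rfl
lemma valuesA_eq (tk : PySem.Set String) : (pvScoresA tk).values = (pvItemsA tk).map Prod.snd := rfl

-- the common tail, with the token set abstracted
lemma branch_eq (tk : PySem.Set String) (htk : tk.Nodup) :
    (if (PySem.List.max? (pvScoresA tk).values (fun x => x)).getD 0 = 0 then "fever_and_cough"
     else pvFirstA ((PySem.List.max? (pvScoresA tk).values (fun x => x)).getD 0) (pvScoresA tk).items)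
  = (pvBest (pvHits tk)).1 := by
  have hB : pvBest (pvHits tk) =
      (pvClusters.map (fun c => (c, ((pvHits tk).count c : Int)))).foldl pvStep
        ("fever_and_cough", 0) := by
    rw [List.foldl_map]; rfl
  rw [hB, lists_eq tk htk, fold_argmax, itemsA_eq, valuesA_eq]
  rcases hitems : pvItemsA tk with _ | ⟨⟨c0, s0⟩, rest⟩
  · exact absurd hitems (by simp [pvItemsA, pvClusterKeywordsA])
  · have hs0 : 0 ≤ s0 := by
      have : (c0, s0) ∈ pvItemsA tk := by rw [hitems]; exact List.mem_cons_self
      obtain ⟨ck, _, hck⟩ := List.mem_map.mp this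
      have : s0 = PySem.Set.len (PySem.Set.inter tk ck.2) := (congrArg Prod.snd hck).symm
      rw [this]; simp [PySem.Set.len]
    simp only [List.map_cons, PySem.List.max?_id_cons, Option.getD_some, List.foldl_cons]
    rw [max_eq_right hs0]
    have hle := (PySem.List.le_foldl_max (rest.map Prod.snd) s0).1
    by_cases h0 : (rest.map Prod.snd).foldl max s0 = 0
    · rw [if_pos h0, if_neg (by omega)]
    · rw [if_neg h0, if_pos (by omega)]

-- ===== VERDICT (by name: the statement is the Claim_ definition above) =====
set_option maxRecDepth 16384 in
theorem match_complaint_to_cluster_spec : Claim_equal_match_complaint_to_cluster := by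
  intro s _
  unfold Spec_match_complaint_to_cluster
  by_cases hs : s = ""
  · subst hs; decide
  · unfold match_complaint_to_cluster match_complaint_to_cluster_alt
    rw [if_neg hs]
    exact branch_eq _ (tokens_nodup _ _ _ (PySem.Set.nodup_ofList _))
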